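-- pv_equiv track=rewrite | github.com/FahadBinJunaid/physical-ai-humanoid-textbook | chatbot-backend/agent.py | get_conversation_context_window
-- ===== SOURCE A (Python) =====
-- from typing import List, Dict, Any, Optional
--
-- def get_conversation_context_window(conversation_history: List[Dict[str, str]], max_context_length: int = 2000) -> List[Dict[str, str]]:
--     """
--     Get a window of conversation history that fits within the context length limit
--     """
--     if not conversation_history:
--         return []
--
--     # Start from the most recent and work backwards until we reach the length limit
--     context_window = []
--     current_length = 0
--
--     for exchange in reversed(conversation_history):
--         exchange_str = f"{exchange.get('role', 'user')}: {exchange.get('content', '')}"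
--         if current_length + len(exchange_str) > max_context_length:
--             break
--
--         context_window.insert(0, exchange)  # Insert at beginning to maintain order
--         current_length += len(exchange_str)
--
--     return context_window
-- ===== SOURCE B (Python) =====
-- def get_conversation_context_window(conversation_history, max_context_length=2000):
--     # Table of formatted lengths, cumulative sums over the reversed lengths,
--     # count how many most-recent exchanges fit, return one slice.
--     lens = [len(f"{e.get('role', 'user')}: {e.get('content', '')}")
--             for e in conversation_history]
--     sums = []
--     total = 0
--     for x in reversed(lens):
--         total += x
--         sums.append(total)
--     count = 0
--     while count < len(sums) and sums[count] <= max_context_length: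
--         count += 1
--     return conversation_history[len(conversation_history) - count:]
-- ===== Notes on version B (the rewrite author's own statement) =====
-- stated objective: alternative
-- what changed: Replaces the reverse loop that grows the window with insert(0) by a cumulative-length table over the reversed formatted lengths, a count of how many recent exchanges fit, and a single tail slice.
import Mathlib
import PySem

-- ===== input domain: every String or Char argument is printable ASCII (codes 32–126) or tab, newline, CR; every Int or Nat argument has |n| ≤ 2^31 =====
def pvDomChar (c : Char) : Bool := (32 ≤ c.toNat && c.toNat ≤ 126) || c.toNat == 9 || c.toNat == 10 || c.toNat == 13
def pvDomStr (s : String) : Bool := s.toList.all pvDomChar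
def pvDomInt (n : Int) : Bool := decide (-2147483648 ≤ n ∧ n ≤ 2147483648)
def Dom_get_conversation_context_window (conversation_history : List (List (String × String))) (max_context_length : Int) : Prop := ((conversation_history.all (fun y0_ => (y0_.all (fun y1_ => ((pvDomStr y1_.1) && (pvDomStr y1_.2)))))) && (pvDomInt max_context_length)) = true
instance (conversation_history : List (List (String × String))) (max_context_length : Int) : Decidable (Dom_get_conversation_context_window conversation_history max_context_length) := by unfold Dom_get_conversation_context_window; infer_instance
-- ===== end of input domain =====

-- B replaces the reverse loop growing the window with insert(0) by a lengths table,
-- cumulative sums over the reversed lengths, a fit count and one tail slice (objective: alternative).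

-- ===== PORT A =====
-- f"{e.get('role','user')}: {e.get('content','')}" (shared: both Pythons format exchanges identically)
def pvFmt (e : List (String × String)) : String :=
  (PySem.Dict.mk e).getD "role" "user" ++ ": " ++ (PySem.Dict.mk e).getD "content" ""

-- A's loop over reversed(conversation_history), carrying (current_length, context_window)
def pvALoop (M : Int) : List (List (String × String)) → Int → List (List (String × String)) → List (List (String × String))
  | [], _, w => w
  | e :: rest, cur, w =>
    let s := pvFmt e
    if cur + PySem.Str.len s > M then w
    else pvALoop M rest (cur + PySem.Str.len s) (PySem.List.insert w 0 e)

def get_conversation_context_window (conversation_history : List (List (String × String))) (max_context_length : Int) : List (List (String × String)) :=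
  if conversation_history = [] then []
  else pvALoop max_context_length conversation_history.reverse 0 []

-- ===== PORT B =====
-- cumulative sums (B's `for x in reversed(lens): total += x; sums.append(total)`)
def pvCumsum : List Int → Int → List Int
  | [], _ => []
  | x :: xs, acc => (acc + x) :: pvCumsum xs (acc + x)

-- B's `while count < len(sums) and sums[count] <= max_context_length: count += 1`
def pvCount (M : Int) : List Int → Nat
  | [] => 0
  | s :: rest => if s ≤ M then pvCount M rest + 1 else 0

def get_conversation_context_window_alt (conversation_history : List (List (String × String))) (max_context_length : Int) : List (List (String × String)) :=
  let lens := conversation_history.map (fun e => PySem.Str.len (pvFmt e))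
  let sums := pvCumsum lens.reverse 0
  let count := pvCount max_context_length sums
  conversation_history.drop (conversation_history.length - count)

-- ===== PRECONDITION & SPEC =====
def Spec_get_conversation_context_window (conversation_history : List (List (String × String))) (max_context_length : Int) (out : List (List (String × String))) : Prop := out = get_conversation_context_window_alt conversation_history max_context_length
instance (conversation_history : List (List (String × String))) (max_context_length : Int) (out : List (List (String × String))) : Decidable (Spec_get_conversation_context_window conversation_history max_context_length out) := by unfold Spec_get_conversation_context_window; infer_instance

-- ===== CLAIM (what is proved, stated in full; the proofs are below) =====
def Claim_equal_get_conversation_context_window : Prop := ∀ (conversation_history : List (List (String × String))) (max_context_length : Int), Dom_get_conversation_context_window conversation_history max_context_length → Spec_get_conversation_context_window conversation_history max_context_length (get_conversation_context_window conversation_history max_context_length)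

-- ===== LEMMAS AND PROOFS =====

theorem pvALoop_eq_take (M : Int) (l : List (List (String × String))) :
    ∀ (acc : Int) (w : List (List (String × String))),
    pvALoop M l acc w
      = (l.take (pvCount M (pvCumsum (l.map (fun e => PySem.Str.len (pvFmt e))) acc))).reverse ++ w := by
  induction l with
  | nil => intro acc w; simp [pvALoop, pvCumsum, pvCount]
  | cons e rest ih =>
    intro acc w
    simp only [pvALoop, List.map_cons, pvCumsum, pvCount]
    by_cases h : acc + PySem.Str.len (pvFmt e) ≤ M
    · rw [if_neg (by omega), if_pos h, ih]
      simp [PySem.List.insert, PySem.List.sliceIndices]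
    · rw [if_pos (by omega), if_neg h]
      simp

theorem get_conversation_context_window_spec : Claim_equal_get_conversation_context_window := by
  intro h M _
  unfold Spec_get_conversation_context_window get_conversation_context_window
    get_conversation_context_window_alt
  by_cases hnil : h = []
  · subst hnil; simp [pvCumsum, pvCount]
  · rw [if_neg hnil, pvALoop_eq_take, List.append_nil]
    simp only [← List.map_reverse, List.take_reverse]
    simp
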